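-- pv_equiv track=rewrite | github.com/rytai/ReStart | dialogs.py | dialog_to_multiline_list
-- ===== SOURCE A (Python) =====
-- def dialog_to_multiline_list(dialog):
--     """
--     Pätkitaan |-merkillä erotetut rivit listan sisälle muotoon:
--     [rivi1, rivi2, rivi3, rivi4]
--     :param dialog: str
--     :rtype: list[str]
--     """
--     assert isinstance(dialog, str)
--
--     sentence = ""
--     dialog_list = ['', '', '', '']
--     dialog_line = 0
--
--     for symbol in dialog:
--         if symbol == '|':  # Rivi vaihtuu
--             dialog_list[dialog_line] = sentence
--             dialog_line += 1
--             sentence = ''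
--         else:
--             sentence += symbol
--
--     # last line
--     dialog_list[dialog_line] = sentence
--
--     return dialog_list
-- ===== SOURCE B (Python) =====
-- def dialog_to_multiline_list(dialog):
--     """
--     Split |-separated lines into a fixed 4-slot list [line1, line2, line3, line4].
--     """
--     assert isinstance(dialog, str)
--
--     dialog_list = ['', '', '', '']
--     for i, segment in enumerate(dialog.split('|')):
--         dialog_list[i] = segment
--     return dialog_list
-- ===== Notes on version B (the rewrite author's own statement) =====
-- stated objective: simpler
-- what changed: Replaces the character-by-character scan with accumulator string and branch on '|' by one library split('|') and a positional-assignment pass of the segments into the fixed 4-slot list.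
import Mathlib
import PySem

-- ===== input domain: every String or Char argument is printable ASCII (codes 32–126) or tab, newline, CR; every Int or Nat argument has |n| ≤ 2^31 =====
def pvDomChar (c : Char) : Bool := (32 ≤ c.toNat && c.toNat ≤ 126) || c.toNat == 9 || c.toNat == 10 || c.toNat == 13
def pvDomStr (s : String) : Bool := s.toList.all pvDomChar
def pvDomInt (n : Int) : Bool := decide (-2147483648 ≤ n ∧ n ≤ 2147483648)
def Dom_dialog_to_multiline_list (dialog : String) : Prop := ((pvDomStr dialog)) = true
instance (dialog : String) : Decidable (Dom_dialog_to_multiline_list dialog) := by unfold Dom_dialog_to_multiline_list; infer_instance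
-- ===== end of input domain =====

-- B replaces A's character-by-character scan with one split('|') plus a positional-assignment
-- pass into the fixed 4-slot list (objective: simpler).

-- ===== PORT A =====
-- the character loop: state = (sentence, dialog_list, dialog_line); list assignment is
-- List.set, which is exact on the in-range indices Pre_ admits (Python raises out of range)
def dialogGoA : List Char → List Char → List String → Nat → List String
  | [], sentence, dlist, line => dlist.set line (String.mk sentence)
  | c :: rest, sentence, dlist, line =>
    if c = '|' then dialogGoA rest [] (dlist.set line (String.mk sentence)) (line + 1)
    else dialogGoA rest (sentence ++ [c]) dlist line

def dialog_to_multiline_list (dialog : String) : List String :=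
  dialogGoA dialog.toList [] ["", "", "", ""] 0

-- ===== PORT B =====
-- dialog.split('|') for the one-character separator is List.splitOn '|';
-- enumerate indices are ≥ 0, so .toNat is exact; List.set is exact on in-range indices
def dialog_to_multiline_list_alt (dialog : String) : List String :=
  (PySem.List.enumerate ((dialog.toList.splitOn '|').map String.mk)).foldl
    (fun dlist p => dlist.set p.1.toNat p.2) ["", "", "", ""]

-- ===== PRECONDITION & SPEC =====
-- Pre_ excludes strings with four or more '|' (both Pythons raise IndexError there)
def Pre_dialog_to_multiline_list (dialog : String) : Prop := dialog.toList.count '|' ≤ 3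
instance (dialog : String) : Decidable (Pre_dialog_to_multiline_list dialog) := by
  unfold Pre_dialog_to_multiline_list; infer_instance
def pvWitness_dialog_to_multiline_list : String := "hi|there|reader"

def Spec_dialog_to_multiline_list (dialog : String) (out : List String) : Prop := out = dialog_to_multiline_list_alt dialog
instance (dialog : String) (out : List String) : Decidable (Spec_dialog_to_multiline_list dialog out) := by unfold Spec_dialog_to_multiline_list; infer_instance

-- ===== CLAIM (what is proved, stated in full; the proofs are below) =====
def Claim_equal_dialog_to_multiline_list : Prop := ∀ (dialog : String), Dom_dialog_to_multiline_list dialog → Pre_dialog_to_multiline_list dialog → Spec_dialog_to_multiline_list dialog (dialog_to_multiline_list dialog)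

-- ===== LEMMAS AND PROOFS =====

-- sequential positional assignment of segments, starting at slot i
def setSegs (dlist : List String) (i : Nat) : List String → List String
  | [] => dlist
  | seg :: rest => setSegs (dlist.set i seg) (i + 1) rest

theorem dialogGoA_eq_setSegs (cs : List Char) :
    ∀ (s : List Char) (dl : List String) (i : Nat),
      dialogGoA cs s dl i
        = setSegs dl i (((cs.splitOn '|').modifyHead (s ++ ·)).map String.mk) := by
  induction cs with
  | nil =>
    intro s dl i
    simp [dialogGoA, List.splitOn, List.splitOnP_nil, setSegs, List.modifyHead]
  | cons c rest ih =>
    intro s dl i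
    by_cases hc : c = '|'
    · subst hc
      simp only [dialogGoA, ih, List.splitOn, List.splitOnP_cons]
      cases rest.splitOnP (· == '|') <;> simp [List.modifyHead, setSegs]
    · simp only [dialogGoA, ih, List.splitOn, List.splitOnP_cons, beq_iff_eq,
        if_neg hc]
      cases h : (rest.splitOnP (· == '|')) with
      | nil => simp [List.modifyHead]
      | cons hd tl => simp [List.modifyHead]

theorem foldl_enumerate_set (segs : List String) :
    ∀ (dl : List String) (n : Nat),
      (PySem.List.enumerate segs (n : Int)).foldl
          (fun dlist p => dlist.set p.1.toNat p.2) dl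
        = setSegs dl n segs := by
  induction segs with
  | nil => intro dl n; rfl
  | cons seg rest ih =>
    intro dl n
    have hcons : PySem.List.enumerate (seg :: rest) (n : Int)
        = ((n : Int), seg) :: PySem.List.enumerate rest ((n : Int) + 1) := rfl
    have hcast : ((n : Int) + 1) = ((n + 1 : Nat) : Int) := by push_cast; ring
    rw [hcons, List.foldl_cons, hcast, ih]
    simp [setSegs]

-- ===== VERDICT (by name: the statement is the Claim_ definition above) =====
theorem dialog_to_multiline_list_spec : Claim_equal_dialog_to_multiline_list := by
  intro dialog _ _
  unfold Spec_dialog_to_multiline_list dialog_to_multiline_list dialog_to_multiline_list_alt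
  rw [dialogGoA_eq_setSegs]
  have h0 : ((0 : Nat) : Int) = (0 : Int) := rfl
  rw [← h0, foldl_enumerate_set]
  have : (dialog.toList.splitOn '|').modifyHead (([] : List Char) ++ ·)
      = dialog.toList.splitOn '|' := by
    cases dialog.toList.splitOn '|' <;> simp [List.modifyHead]
  rw [this]
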